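-- pv_equiv track=rewrite | github.com/yhyan/pylxr | simpleparse.py | find_escape_char
-- ===== SOURCE A (Python) =====
-- def find_escape_char(s, right, left):
--     c = 0
--     while right > left:
--         if s[right] != '\\':
--             break
--         c += 1
--         right -= 1
--     if c % 2 == 0:
--         return False
--     return True
-- ===== SOURCE B (Python) =====
-- def find_escape_char(s, right, left):
--     if right <= left:
--         return False
--     seg = s[left + 1:right + 1]
--     run = len(seg) - len(seg.rstrip('\\'))
--     return run % 2 == 1
-- ===== Notes on version B (the rewrite author's own statement) =====
-- stated objective: simpler
-- what changed: Replaces the explicit leftward index-walking loop and counter with slicing the (left,right] window once and measuring the trailing-backslash run via rstrip, returning its parity.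
-- outside the precondition, e.g. on find_escape_char('a\\', -1, -2): A returns True, B returns False; on find_escape_char('a', 1, 0): A raises IndexError, B returns False
import Mathlib
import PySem

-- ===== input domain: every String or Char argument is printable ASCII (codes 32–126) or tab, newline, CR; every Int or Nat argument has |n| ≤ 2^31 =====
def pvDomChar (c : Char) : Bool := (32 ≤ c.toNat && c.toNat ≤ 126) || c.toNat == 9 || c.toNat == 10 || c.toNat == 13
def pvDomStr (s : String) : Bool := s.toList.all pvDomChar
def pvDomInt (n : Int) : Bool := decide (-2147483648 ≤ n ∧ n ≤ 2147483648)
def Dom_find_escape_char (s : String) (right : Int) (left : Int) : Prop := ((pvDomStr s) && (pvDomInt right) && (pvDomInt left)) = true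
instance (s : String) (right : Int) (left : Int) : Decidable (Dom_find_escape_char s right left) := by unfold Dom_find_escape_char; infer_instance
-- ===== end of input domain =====

-- B replaces A's leftward index-walking loop by slicing the (left,right] window and taking the
-- parity of its trailing-backslash run (objective: simpler). Return values only; no mutation.

-- ===== PORT A =====
-- the while loop; on an out-of-range index Python raises IndexError (excluded by Pre_), here we stop
def pvLoopA (s : String) (right left : Int) (c : Nat) : Nat :=
  if right > left then
    match PySem.Str.pyGet? s right with
    | none => c                      -- IndexError in Python; unreachable under Pre_
    | some ch =>
      if ch ≠ '\\' then c
      else pvLoopA s (right - 1) left (c + 1)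
  else c
termination_by (right - left).toNat
decreasing_by omega

def find_escape_char (s : String) (right : Int) (left : Int) : Bool :=
  let c := pvLoopA s right left 0
  if c % 2 == 0 then false else true

-- ===== PORT B =====
-- hand port of seg.rstrip('\\') (PySem has no rstrip-with-chars): drop trailing backslashes; exact
def pvRstripBS (l : List Char) : List Char := (l.reverse.dropWhile (· == '\\')).reverse

def find_escape_char_alt (s : String) (right : Int) (left : Int) : Bool :=
  if right ≤ left then false
  else
    let seg := (PySem.Str.slice s (some (left + 1)) (some (right + 1))).toList
    let run := seg.length - (pvRstripBS seg).length
    run % 2 == 1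

-- ===== PRECONDITION & SPEC =====
-- Pre_ excludes inputs where the scan reaches an index ≥ len(s) (A raises IndexError) and inputs
-- where the scan uses negative indices, on which A's wraparound and B's slice clamping are both
-- accidental, unspecified behaviours.
def Pre_find_escape_char (s : String) (right : Int) (left : Int) : Prop :=
  right ≤ left ∨ (-1 ≤ left ∧ right < (s.toList.length : Int))
instance (s : String) (right : Int) (left : Int) : Decidable (Pre_find_escape_char s right left) := by unfold Pre_find_escape_char; infer_instance

def pvWitness_find_escape_char : String × Int × Int := ("ab\\", 2, 0)

def Spec_find_escape_char (s : String) (right : Int) (left : Int) (out : Bool) : Prop := out = find_escape_char_alt s right left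
instance (s : String) (right : Int) (left : Int) (out : Bool) : Decidable (Spec_find_escape_char s right left out) := by unfold Spec_find_escape_char; infer_instance

-- ===== CLAIM (what is proved, stated in full; the proofs are below) =====
def Claim_equal_find_escape_char : Prop := ∀ (s : String) (right : Int) (left : Int), Dom_find_escape_char s right left → Pre_find_escape_char s right left → Spec_find_escape_char s right left (find_escape_char s right left)

-- ===== LEMMAS AND PROOFS =====

-- trailing-backslash run length
def pvTrail (l : List Char) : Nat := (l.reverse.takeWhile (· == '\\')).length

theorem pvTrail_append (xs : List Char) (a : Char) :
    pvTrail (xs ++ [a]) = if a == '\\' then pvTrail xs + 1 else 0 := by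
  simp only [pvTrail, List.reverse_append, List.reverse_singleton, List.singleton_append,
    List.takeWhile_cons]
  cases h : (a == '\\') <;> simp_all

theorem pvTrail_le (l : List Char) : pvTrail l ≤ l.length := by
  have := (List.takeWhile_prefix (l := l.reverse) (· == '\\')).length_le
  simpa [pvTrail] using this

theorem pvRstripBS_length (l : List Char) :
    (pvRstripBS l).length = l.length - pvTrail l := by
  have h2 : (l.reverse.takeWhile (· == '\\')).length + (l.reverse.dropWhile (· == '\\')).length
      = l.reverse.length := by
    rw [← List.length_append, List.takeWhile_append_dropWhile]
  simp only [List.length_reverse] at h2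
  simp only [pvRstripBS, List.length_reverse, pvTrail]
  omega

theorem pvLoopA_spec (s : String) : ∀ (n : Nat) (right left : Int) (c : Nat),
    (right - left).toNat = n → -1 ≤ left → right < (s.toList.length : Int) →
    pvLoopA s right left c =
      c + pvTrail ((s.toList.drop (left + 1).toNat).take ((right + 1).toNat - (left + 1).toNat)) := by
  intro n
  induction n with
  | zero =>
    intro right left c hn hl hr
    have htake : ((right + 1).toNat - (left + 1).toNat) = 0 := by omega
    rw [pvLoopA]
    simp [htake, pvTrail, if_neg (by omega : ¬ right > left)]
  | succ n ih =>
    intro right left c hn hl hr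
    have hgt : right > left := by omega
    obtain ⟨R, rfl⟩ : ∃ R : Nat, right = (R : Int) :=
      ⟨right.toNat, (Int.toNat_of_nonneg (by omega)).symm⟩
    have hRlt : R < s.toList.length := by omega
    have hget : PySem.Str.pyGet? s (R : Int) = some (s.toList[R]) := by
      rw [PySem.Str.pyGet?_natCast]
      exact List.getElem?_eq_getElem hRlt
    have hsplit : (s.toList.drop (left + 1).toNat).take (((R : Int) + 1).toNat - (left + 1).toNat)
        = (s.toList.drop (left + 1).toNat).take (R - (left + 1).toNat) ++ [s.toList[R]] := by
      have h1 : ((R : Int) + 1).toNat - (left + 1).toNat = (R - (left + 1).toNat) + 1 := by omega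
      have h2 : (s.toList.drop (left + 1).toNat)[R - (left + 1).toNat]? = some s.toList[R] := by
        rw [List.getElem?_drop]
        have h3 : (left + 1).toNat + (R - (left + 1).toNat) = R := by omega
        rw [h3]
        exact List.getElem?_eq_getElem hRlt
      rw [h1, List.take_add_one, h2]
      rfl
    rw [pvLoopA, if_pos hgt, hget]
    dsimp only
    by_cases hch : s.toList[R] = '\\'
    · rw [if_neg (by simpa using hch)]
      have hIH := ih ((R : Int) - 1) left (c + 1) (by omega) hl (by omega)
      have hRR : (R : Int) - 1 + 1 = (R : Int) := by ring
      rw [hRR] at hIH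
      simp only [Int.toNat_natCast] at hIH
      rw [hIH, hsplit, pvTrail_append]
      simp only [hch, beq_self_eq_true, if_true]
      omega
    · rw [if_pos hch, hsplit, pvTrail_append]
      simp [hch]

-- ===== VERDICT (by name: the statement is the Claim_ definition above) =====
theorem find_escape_char_spec : Claim_equal_find_escape_char := by
  intro s right left _hdom hpre
  unfold Spec_find_escape_char
  by_cases hle : right ≤ left
  · simp only [find_escape_char, find_escape_char_alt]
    rw [pvLoopA]
    simp [if_neg (by omega : ¬ right > left), if_pos hle]
  · have hl : -1 ≤ left ∧ right < (s.toList.length : Int) := by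
      rcases hpre with h | h
      · exact absurd h hle
      · exact h
    obtain ⟨hl1, hr⟩ := hl
    have hloop := pvLoopA_spec s (right - left).toNat right left 0 rfl hl1 hr
    have hslice : (PySem.Str.slice s (some (left + 1)) (some (right + 1))).toList
        = (s.toList.drop (left + 1).toNat).take ((right + 1).toNat - (left + 1).toNat) := by
      rw [PySem.Str.toList_slice]
      exact PySem.List.slice_toNat _ (by omega) (by omega)
    simp only [find_escape_char, find_escape_char_alt]
    rw [if_neg hle, hslice, hloop, pvRstripBS_length]
    have htr := pvTrail_le
      ((s.toList.drop (left + 1).toNat).take ((right + 1).toNat - (left + 1).toNat))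
    have hrun : ∀ m k : Nat, k ≤ m → m - (m - k) = k := by omega
    rw [hrun _ _ htr]
    simp only [Nat.zero_add]
    rcases Nat.mod_two_eq_zero_or_one
      (pvTrail ((s.toList.drop (left + 1).toNat).take ((right + 1).toNat - (left + 1).toNat)))
      with h | h <;> simp [h]
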